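-- pv_equiv track=rewrite | github.com/dorshamo/MLM | HW/hw4/untitled0.py | sym_not_coprime_lists
-- ===== SOURCE A (Python) =====
-- def gcd(x,y):
--     if y == 0:
--         return x
--     return gcd(y,x % y)
--
-- def sym_not_coprime(lst):
--     n = len(lst)
--     if lst ==[]:
--         return True
--
--     elif gcd(lst[0], lst[n-1]) !=1:
--         return sym_not_coprime(lst[1:-1])
--     else:
--         if n == 1:
--             return True
--         else:
--             False
--
--     b = True
--     n = len(lst)
--     if lst == []:
--         return b
--     elif gcd(lst[0], lst[n-1]) != 1:
--         lst = lst[1:-1]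
--         b = sym_not_coprime(lst)
--         return b
--     else:
--         if lst[0] != 1 and lst[n-1] != 1:
--             b = False
--         return b
--
-- def sym_not_coprime_lists(lst_of_lsts):
--     if not lst_of_lsts:
--         return True
--     else:
--         lst = lst_of_lsts[0]
--         lst_true_or_false = sym_not_coprime(lst)
--         if not lst_true_or_false:
--             return False
--         else:
--             return sym_not_coprime_lists(lst_of_lsts[1:])
-- ===== SOURCE B (Python) =====
-- def sym_not_coprime_lists(lst_of_lsts):
--     for lst in lst_of_lsts:
--         i, j = 0, len(lst) - 1
--         while i < j:
--             x, y = lst[i], lst[j]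
--             while y:
--                 x, y = y, x % y
--             if x != 1:
--                 i += 1
--                 j -= 1
--             elif lst[i] == 1 or lst[j] == 1:
--                 break
--             else:
--                 return False
--     return True
-- ===== Notes on version B (the rewrite author's own statement) =====
-- stated objective: alternative
-- what changed: Replaces A's slice-copy recursion (a fresh lst[1:-1] copy per step and a recursive call per outer list element) with a single two-pointer index scan over each sublist inside one loop over the outer list, with the gcd computed by an iterative Euclid loop; avoids per-step list copies and deep recursion, though a timing run showed no measurable speedup on its inputs.
import Mathlib
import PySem

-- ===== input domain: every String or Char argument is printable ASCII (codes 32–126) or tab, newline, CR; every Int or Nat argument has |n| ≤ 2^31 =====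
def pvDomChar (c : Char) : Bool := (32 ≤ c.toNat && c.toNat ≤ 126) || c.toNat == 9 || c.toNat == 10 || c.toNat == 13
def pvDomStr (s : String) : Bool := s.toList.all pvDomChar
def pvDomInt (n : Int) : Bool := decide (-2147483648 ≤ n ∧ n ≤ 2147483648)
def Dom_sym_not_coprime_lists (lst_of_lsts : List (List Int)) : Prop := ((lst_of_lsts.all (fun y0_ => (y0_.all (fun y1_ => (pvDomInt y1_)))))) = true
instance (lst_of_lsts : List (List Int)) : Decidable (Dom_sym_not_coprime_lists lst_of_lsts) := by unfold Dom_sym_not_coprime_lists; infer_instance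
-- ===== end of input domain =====

-- B replaces A's slice-copy recursion (a fresh lst[1:-1] copy per step) by a single
-- two-pointer pass over each sublist with index bounds, and the recursion over the outer
-- list by one loop; no per-step list copies (not measurably faster on the timed inputs).

-- ===== PORT A =====
-- termination helper for the Euclidean recursions (cited by decreasing_by)
lemma pymod_natAbs_lt (x y : Int) (h : y ≠ 0) : (PySem.Int.mod x y).natAbs < y.natAbs := by
  rcases lt_or_gt_of_ne h with hy | hy
  · have := PySem.Int.mod_neg_bounds (a := x) hy
    omega
  · have h1 := PySem.Int.mod_nonneg (a := x) hy
    have h2 := PySem.Int.mod_lt (a := x) hy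
    omega

-- lst[1:-1] as drop-first-and-last (cited by sym_not_coprime's decreasing_by)
lemma slice_one_neg_one (xs : List Int) :
    PySem.List.slice xs (some 1) (some (-1)) = xs.tail.dropLast := by
  simp [PySem.List.slice, PySem.List.clampIdx]
  rcases xs with _ | ⟨a, t⟩
  · simp
  · simp [List.dropLast_eq_take]

-- A's recursive gcd
def pyGcd (x y : Int) : Int :=
  if y = 0 then x else pyGcd y (PySem.Int.mod x y)
termination_by y.natAbs
decreasing_by
  rename_i h
  exact pymod_natAbs_lt x y h

-- A's sym_not_coprime, including the fall-through after the bare `False` statement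
def sym_not_coprime (lst : List Int) : Bool :=
  let n := lst.length
  if lst = [] then true
  else if pyGcd (PySem.List.pyGetD lst 0 0) (PySem.List.pyGetD lst ((n : Int) - 1) 0) ≠ 1 then
    sym_not_coprime (PySem.List.slice lst (some 1) (some (-1)))
  else if n = 1 then true
  else
    -- the bare `False` falls through to the second block below
    let b := true
    if lst = [] then b
    else if pyGcd (PySem.List.pyGetD lst 0 0) (PySem.List.pyGetD lst ((n : Int) - 1) 0) ≠ 1 then
      sym_not_coprime (PySem.List.slice lst (some 1) (some (-1)))
    else if PySem.List.pyGetD lst 0 0 ≠ 1 ∧ PySem.List.pyGetD lst ((n : Int) - 1) 0 ≠ 1 then false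
    else b
termination_by lst.length
decreasing_by
  all_goals
    rename_i hne _
    rw [slice_one_neg_one]
    have : lst.length ≠ 0 := by simpa using (List.length_pos_of_ne_nil hne).ne'
    simp [List.length_dropLast]
    omega

def sym_not_coprime_lists (lst_of_lsts : List (List Int)) : Bool :=
  if lst_of_lsts = [] then true
  else
    let lst := PySem.List.pyGetD lst_of_lsts 0 []
    let lst_true_or_false := sym_not_coprime lst
    if !lst_true_or_false then false
    else sym_not_coprime_lists (PySem.List.slice lst_of_lsts (some 1) none)
termination_by lst_of_lsts.length
decreasing_by
  rename_i hne _
  rw [PySem.List.slice_from_one]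
  have : lst_of_lsts.length ≠ 0 := by simpa using (List.length_pos_of_ne_nil hne).ne'
  simp
  omega

-- ===== PORT B =====
-- B's inner `while y:` gcd loop
def gcdIter (x y : Int) : Int :=
  if y = 0 then x else gcdIter y (PySem.Int.mod x y)
termination_by y.natAbs
decreasing_by
  rename_i h
  exact pymod_natAbs_lt x y h

-- B's two-pointer `while i < j:` loop (break → true, early return → false)
def altLoop (lst : List Int) (i j : Nat) : Bool :=
  if i < j then
    if gcdIter (lst.getD i 0) (lst.getD j 0) ≠ 1 then altLoop lst (i + 1) (j - 1)
    else if lst.getD i 0 = 1 ∨ lst.getD j 0 = 1 then true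
    else false
  else true
termination_by j - i

def sym_not_coprime_lists_alt (lst_of_lsts : List (List Int)) : Bool :=
  lst_of_lsts.all (fun lst => altLoop lst 0 (lst.length - 1))

-- ===== PRECONDITION & SPEC =====
def Spec_sym_not_coprime_lists (lst_of_lsts : List (List Int)) (out : Bool) : Prop := out = sym_not_coprime_lists_alt lst_of_lsts
instance (lst_of_lsts : List (List Int)) (out : Bool) : Decidable (Spec_sym_not_coprime_lists lst_of_lsts out) := by unfold Spec_sym_not_coprime_lists; infer_instance

-- ===== CLAIM (what is proved, stated in full; the proofs are below) =====
def Claim_equal_sym_not_coprime_lists : Prop := ∀ (lst_of_lsts : List (List Int)), Dom_sym_not_coprime_lists lst_of_lsts → Spec_sym_not_coprime_lists lst_of_lsts (sym_not_coprime_lists lst_of_lsts)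

-- ===== LEMMAS AND PROOFS =====
lemma gcd_eq (x y : Int) : gcdIter x y = pyGcd x y := by
  fun_induction gcdIter x y with
  | _ => rw [pyGcd]; simp_all

lemma getD_mid (a z d : Int) (ys : List Int) (i : Nat) (hi : i < ys.length) :
    (a :: (ys ++ [z])).getD (i + 1) d = ys.getD i d := by
  simp [List.getD, List.getElem?_append_left hi]

lemma altLoop_shift (a z : Int) (ys : List Int) (i j : Nat) (hj : j < ys.length) :
    altLoop (a :: (ys ++ [z])) (i + 1) (j + 1) = altLoop ys i j := by
  fun_induction altLoop ys i j with
  | case1 i j hij hg ih =>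
    rw [altLoop]
    rw [getD_mid a z 0 ys i (by omega), getD_mid a z 0 ys j hj]
    simp only [if_pos (by omega : i + 1 < j + 1), if_pos hg]
    have h2 : j + 1 - 1 = (j - 1) + 1 := by omega
    rw [h2, ih (by omega)]
  | case2 i j hij hg hone =>
    rw [altLoop]
    rw [getD_mid a z 0 ys i (by omega), getD_mid a z 0 ys j hj]
    simp only [if_pos (by omega : i + 1 < j + 1), if_neg hg, if_pos hone]
  | case3 i j hij hg hone =>
    rw [altLoop]
    rw [getD_mid a z 0 ys i (by omega), getD_mid a z 0 ys j hj]
    simp only [if_pos (by omega : i + 1 < j + 1), if_neg hg, if_neg hone]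
  | case4 i j hij =>
    rw [altLoop, altLoop]
    simp only [if_neg (by omega : ¬ (i + 1 < j + 1))]

lemma sym_not_coprime_nil : sym_not_coprime [] = true := by rw [sym_not_coprime]; simp

lemma altLoop_stop (lst : List Int) (i j : Nat) (h : ¬ i < j) : altLoop lst i j = true := by
  rw [altLoop]; simp [h]

lemma sym_not_coprime_cons (a z : Int) (mid : List Int) :
    sym_not_coprime (a :: (mid ++ [z])) =
      (if pyGcd a z ≠ 1 then sym_not_coprime mid else if a ≠ 1 ∧ z ≠ 1 then false else true) := by
  have ha : PySem.List.pyGetD (a :: (mid ++ [z])) 0 0 = a := PySem.List.pyGetD_zero_cons a (mid ++ [z]) 0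
  have hcast : ((a :: (mid ++ [z])).length : Int) - 1 = ((mid.length + 1 : Nat) : Int) := by
    simp
  have hz : PySem.List.pyGetD (a :: (mid ++ [z])) ((mid.length + 1 : Nat) : Int) 0 = z := by
    rw [PySem.List.pyGetD_natCast]
    simp [List.getD]
  have hslice : PySem.List.slice (a :: (mid ++ [z])) (some 1) (some (-1)) = mid := by
    rw [slice_one_neg_one]; simp
  rw [sym_not_coprime]
  simp only [hcast, ha, hz, hslice]
  have hne : ¬ (a :: (mid ++ [z]) = []) := by simp
  have hlen1 : ¬ ((a :: (mid ++ [z])).length = 1) := by simp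
  simp only [if_neg hne, if_neg hlen1]
  by_cases hg : pyGcd a z ≠ 1
  · simp [hg]
  · simp [hg]

lemma sym_not_coprime_eq_aux (n : Nat) :
    ∀ lst : List Int, lst.length = n → sym_not_coprime lst = altLoop lst 0 (lst.length - 1) := by
  induction n using Nat.strong_induction_on with
  | _ n ih =>
    intro lst hlen
    rcases lst with _ | ⟨a, rest⟩
    · rw [sym_not_coprime, altLoop]; simp
    · rcases eq_or_ne rest [] with rfl | hrest
      · rw [sym_not_coprime]
        simp only [List.length_cons, List.length_nil, slice_one_neg_one]
        norm_num [PySem.List.pyGetD_zero_cons, sym_not_coprime_nil, altLoop_stop]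
      · obtain ⟨mid, z, rfl⟩ : ∃ mid z, rest = mid ++ [z] :=
          ⟨rest.dropLast, rest.getLast hrest, (rest.dropLast_append_getLast hrest).symm⟩
        have hzD : (a :: (mid ++ [z])).getD (mid.length + 1) 0 = z := by
          simp [List.getD]
        have hl1 : (a :: (mid ++ [z])).length - 1 = mid.length + 1 := by simp
        rw [sym_not_coprime_cons, hl1, altLoop]
        simp only [List.getD_cons_zero, hzD, if_pos (Nat.succ_pos mid.length), gcd_eq]
        by_cases hg : pyGcd a z ≠ 1
        · simp only [if_pos hg]
          rw [ih mid.length (by simp at hlen; omega) mid rfl]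
          rcases eq_or_ne mid [] with rfl | hmne
          · rw [altLoop_stop _ _ _ (by simp), altLoop_stop _ _ _ (by simp)]
          · have hpos := List.length_pos_of_ne_nil hmne
            have hs := altLoop_shift a z mid 0 (mid.length - 1) (by omega)
            have he : mid.length - 1 + 1 = mid.length := by omega
            rw [he] at hs
            simpa using hs.symm
        · simp only [if_neg hg]
          by_cases ha1 : a = 1 <;> by_cases hz1 : z = 1 <;> simp [ha1, hz1]

lemma sym_not_coprime_eq (lst : List Int) :
    sym_not_coprime lst = altLoop lst 0 (lst.length - 1) :=
  sym_not_coprime_eq_aux lst.length lst rfl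

lemma lists_eq (l : List (List Int)) : sym_not_coprime_lists l = sym_not_coprime_lists_alt l := by
  fun_induction sym_not_coprime_lists l with
  | case1 => rfl
  | case2 l hne lst r hr =>
    rcases l with _ | ⟨x, t⟩
    · exact absurd rfl hne
    · have hlst : PySem.List.pyGetD (x :: t) 0 ([] : List Int) = x := PySem.List.pyGetD_zero_cons x t []
      have hr2 : (!sym_not_coprime (PySem.List.pyGetD (x :: t) 0 ([] : List Int))) = true := hr
      rw [hlst] at hr2
      have hr' : sym_not_coprime x = false := by simpa using hr2
      simp only [sym_not_coprime_lists_alt, List.all_cons]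
      rw [← sym_not_coprime_eq, hr']
      rfl
  | case3 l hne lst r hr ihr =>
    rcases l with _ | ⟨x, t⟩
    · exact absurd rfl hne
    · have hlst : PySem.List.pyGetD (x :: t) 0 ([] : List Int) = x := PySem.List.pyGetD_zero_cons x t []
      have hr2 : ¬ (!sym_not_coprime (PySem.List.pyGetD (x :: t) 0 ([] : List Int))) = true := hr
      rw [hlst] at hr2
      have hr' : sym_not_coprime x = true := by simpa using hr2
      rw [PySem.List.slice_from_one, List.tail_cons] at ihr ⊢
      rw [ihr]
      simp only [sym_not_coprime_lists_alt, List.all_cons]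
      rw [← sym_not_coprime_eq, hr']
      rfl

-- ===== VERDICT (by name: the statement is the Claim_ definition above) =====
theorem sym_not_coprime_lists_spec : Claim_equal_sym_not_coprime_lists := by
  intro lst_of_lsts _
  unfold Spec_sym_not_coprime_lists
  exact lists_eq lst_of_lsts
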